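-- pv_equiv track=rewrite | github.com/ngocdha/segSpin | pruned_restricted_gibbs.py | basis_bitmasks_k
-- ===== SOURCE A (Python) =====
-- from itertools import combinations
--
-- def basis_bitmasks_k(n, k):
--     if k == 0:
--         return [0]
--     out = []
--     for sites in combinations(range(n), k):
--         s = 0
--         for i in sites:
--             s |= (1 << i)
--         out.append(s)
--     return out
-- ===== SOURCE B (Python) =====
-- def _masks(n, k):
--     # all k-bit masks over bit positions 0..n-1, lowest chosen bit first (lexicographic)
--     if k == 0:
--         return [0]
--     if k > n:
--         return []
--     res = []
--     for i in range(n):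
--         for m in _masks(n - 1 - i, k - 1):
--             res.append((2 * m + 1) << i)
--     return res
--
-- def basis_bitmasks_k(n, k):
--     if k < 0:
--         return []
--     return _masks(n, k)
-- ===== Notes on version B (the rewrite author's own statement) =====
-- stated objective: alternative
-- what changed: B builds each bitmask directly by a shift-and-combine recursion on the lowest chosen bit, instead of enumerating index tuples with itertools.combinations and OR-folding each tuple into a mask.
import Mathlib
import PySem

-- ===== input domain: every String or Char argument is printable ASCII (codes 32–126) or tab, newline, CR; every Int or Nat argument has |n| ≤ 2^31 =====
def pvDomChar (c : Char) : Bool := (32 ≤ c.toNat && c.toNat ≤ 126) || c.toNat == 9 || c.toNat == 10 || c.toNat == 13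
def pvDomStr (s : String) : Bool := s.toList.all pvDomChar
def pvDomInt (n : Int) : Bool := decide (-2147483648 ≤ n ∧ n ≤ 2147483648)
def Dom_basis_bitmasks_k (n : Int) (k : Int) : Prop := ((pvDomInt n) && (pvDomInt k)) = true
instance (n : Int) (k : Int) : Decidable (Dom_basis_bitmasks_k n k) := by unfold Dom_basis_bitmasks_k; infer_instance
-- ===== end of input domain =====

-- B replaces A's itertools.combinations-tuples-then-OR-fold by a recursion on the lowest
-- chosen bit that builds each mask directly (objective: alternative algorithm, not timed faster).

-- ===== PORT A =====
-- itertools.combinations(l, k) in its lexicographic emission order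
-- (the 'if' is itertools' own 'if r > n: return' early-out)
def combosA {α : Type} : List α → Nat → List (List α)
  | _, 0 => [[]]
  | [], _ + 1 => []
  | x :: xs, k + 1 =>
      if xs.length < k then []
      else ((combosA xs k).map (fun s => x :: s)) ++ combosA xs (k + 1)

def basis_bitmasks_k (n : Int) (k : Int) : List Int :=
  if k == 0 then [0]
  else
    -- '1 << i' is ported as (1 : Int) <<< i.toNat: exact, since every i drawn from range(n) is ≥ 0
    (combosA (PySem.List.pyRange 0 n 1) k.toNat).foldl
      (fun out sites =>
        out ++ [sites.foldl (fun s i => PySem.Int.bor s ((1 : Int) <<< i.toNat)) 0])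
      []

-- ===== PORT B =====
-- '(2 * m + 1) << i' is ported as (2 * m + 1) * 2 ^ i: exact, since m ≥ 0 and i : Nat here
def altF : Nat → Nat → List Int
  | _, 0 => [0]
  | n, kk + 1 =>
      if n < kk + 1 then []
      else (List.range n).flatMap (fun i => (altF (n - 1 - i) kk).map (fun m => (2 * m + 1) * 2 ^ i))

def basis_bitmasks_k_alt (n : Int) (k : Int) : List Int :=
  if k < 0 then [] else altF n.toNat k.toNat

-- ===== PRECONDITION & SPEC =====
-- For k < 0 (and k ≠ 0) A raises ValueError (combinations requires non-negative r); excluded.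
def Pre_basis_bitmasks_k (n : Int) (k : Int) : Prop := 0 ≤ k
instance (n : Int) (k : Int) : Decidable (Pre_basis_bitmasks_k n k) := by
  unfold Pre_basis_bitmasks_k; infer_instance

def pvWitness_basis_bitmasks_k : Int × Int := (4, 2)

def Spec_basis_bitmasks_k (n : Int) (k : Int) (out : List Int) : Prop := out = basis_bitmasks_k_alt n k
instance (n : Int) (k : Int) (out : List Int) : Decidable (Spec_basis_bitmasks_k n k out) := by
  unfold Spec_basis_bitmasks_k; infer_instance

-- ===== CLAIM (what is proved, stated in full; the proofs are below) =====
def Claim_equal_basis_bitmasks_k : Prop := ∀ (n : Int) (k : Int), Dom_basis_bitmasks_k n k → Pre_basis_bitmasks_k n k → Spec_basis_bitmasks_k n k (basis_bitmasks_k n k)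

-- ===== LEMMAS AND PROOFS =====

theorem lor_two_pow_of_lt : ∀ (i m : Nat), m < 2 ^ i → m ||| 2 ^ i = m + 2 ^ i := by
  intro i
  induction i with
  | zero =>
    intro m h
    interval_cases m
    decide
  | succ i ih =>
    intro m h
    have h2 : (2 : Nat) ^ (i + 1) = Nat.bit false (2 ^ i) := by
      simp [Nat.bit, Nat.pow_succ, Nat.mul_comm]
    have hd : m.div2 < 2 ^ i := by
      have := Nat.bit_bodd_div2 m
      simp [Nat.bit] at this
      have hb : m.div2 = m / 2 := Nat.div2_val m
      omega
    calc m ||| 2 ^ (i + 1) = Nat.bit m.bodd m.div2 ||| Nat.bit false (2 ^ i) := by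
          rw [Nat.bit_bodd_div2 m, h2]
    _ = Nat.bit (m.bodd || false) (m.div2 ||| 2 ^ i) := Nat.lor_bit ..
    _ = Nat.bit m.bodd (m.div2 + 2 ^ i) := by rw [ih _ hd]; simp
    _ = m + 2 ^ (i + 1) := by
        have := Nat.bit_bodd_div2 m
        simp [Nat.bit] at *
        cases hb : m.bodd <;> simp [hb] at this ⊢ <;> omega

theorem shl_natCast (a : Int) (j : Nat) : a <<< ((j : Int)) = a <<< j := Int.shiftLeft_natCast_right a j

theorem one_shl_eq (i : Nat) : ((1 : Int) <<< i) = ((2 ^ i : Nat) : Int) := by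
  rw [Int.shiftLeft_eq]
  push_cast
  ring

def sumMask (s : List Nat) : Int := (s.map (fun i => (2 : Int) ^ i)).sum

theorem foldA_eq_sumMask : ∀ (sites : List Nat) (b m : Nat),
    sites.Pairwise (· < ·) → (∀ j ∈ sites, b ≤ j) → m < 2 ^ b →
    sites.foldl (fun (s : Int) (i : Nat) => PySem.Int.bor s ((1 : Int) <<< i)) (↑m) = ↑m + sumMask sites := by
  intro sites
  induction sites with
  | nil => intro b m _ _ _; simp [sumMask]
  | cons i t ih =>
    intro b m hpw hb hm
    have hbi : b ≤ i := hb i (by simp)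
    have hmi : m < 2 ^ i := lt_of_lt_of_le hm (Nat.pow_le_pow_right (by omega) hbi)
    have hstep : PySem.Int.bor (↑m) ((1 : Int) <<< i) = ((m + 2 ^ i : Nat) : Int) := by
      rw [one_shl_eq, PySem.Int.bor_natCast, lor_two_pow_of_lt i m hmi]
    have ht : (m + 2 ^ i) < 2 ^ (i + 1) := by
      have : (2:Nat) ^ (i+1) = 2 ^ i + 2 ^ i := by ring
      omega
    have htb : ∀ j ∈ t, i + 1 ≤ j := by
      intro j hj
      have := (List.pairwise_cons.mp hpw).1 j hj
      omega
    have hrec := ih (i + 1) (m + 2 ^ i) (List.pairwise_cons.mp hpw).2 htb ht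
    rw [List.foldl_cons]
    simp only [hstep, hrec]
    simp only [sumMask, List.map_cons, List.sum_cons]
    push_cast
    ring

theorem combosA_map {α β : Type} (f : α → β) : ∀ (l : List α) (k : Nat),
    combosA (l.map f) k = (combosA l k).map (List.map f) := by
  intro l
  induction l with
  | nil => intro k; cases k <;> simp [combosA]
  | cons x xs ih =>
    intro k
    cases k with
    | zero => simp [combosA]
    | succ k =>
      simp only [List.map_cons, combosA, List.length_map]
      split_ifs
      · rfl
      · simp [ih, List.map_map]

theorem combosA_sublist {α : Type} : ∀ (l : List α) (k : Nat) (s : List α),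
    s ∈ combosA l k → s.Sublist l := by
  intro l
  induction l with
  | nil =>
    intro k s hs
    cases k with
    | zero => simp [combosA] at hs; simp [hs]
    | succ k => simp [combosA] at hs
  | cons x xs ih =>
    intro k s hs
    cases k with
    | zero => simp [combosA] at hs; simp [hs]
    | succ k =>
      by_cases hlen : xs.length < k
      · simp [combosA, hlen] at hs
      · simp [combosA, hlen] at hs
        rcases hs with ⟨t, ht, rfl⟩ | hs
        · exact List.Sublist.cons₂ x (ih k t ht)
        · exact List.Sublist.cons x (ih (k + 1) s hs)

theorem sumMask_map_succ (t : List Nat) : sumMask (t.map Nat.succ) = 2 * sumMask t := by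
  induction t with
  | nil => simp [sumMask]
  | cons i t ih =>
    simp only [List.map_cons, sumMask, List.sum_cons] at ih ⊢
    rw [ih, Nat.succ_eq_add_one, pow_succ]
    ring

theorem altF_eq_nil : ∀ (k n : Nat), n < k → altF n k = [] := by
  intro k n h
  cases k with
  | zero => omega
  | succ k => rw [altF, if_pos h]

theorem altF_succ_succ (n kk : Nat) :
    altF (n + 1) (kk + 1) =
      (altF n kk).map (fun m => 2 * m + 1) ++ (altF n (kk + 1)).map (fun m => 2 * m) := by
  by_cases hg : n < kk
  · rw [altF, if_pos (by omega), altF_eq_nil kk n hg, altF_eq_nil (kk + 1) n (by omega)]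
    simp
  conv_lhs => rw [altF]
  rw [if_neg (by omega), List.range_succ_eq_map, List.flatMap_cons, List.flatMap_map]
  congr 1
  · show (altF (n + 1 - 1 - 0) kk).map _ = _
    have e : n + 1 - 1 - 0 = n := by omega
    rw [e]
    simp
  · by_cases he : n = kk
    · subst he
      rw [altF_eq_nil (n + 1) n (by omega)]
      simp only [List.map_nil]
      refine List.flatMap_eq_nil_iff.mpr ?_
      intro i hi
      have hi' : i < n := List.mem_range.mp hi
      rw [altF_eq_nil n (n + 1 - 1 - (i + 1)) (by omega)]
      simp
    conv_rhs => rw [altF]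
    rw [if_neg (by omega), List.map_flatMap]
    refine List.flatMap_congr ?_
    intro i _
    show (altF (n + 1 - 1 - (i + 1)) kk).map _ = _
    have e : n + 1 - 1 - (i + 1) = n - 1 - i := by omega
    rw [e, List.map_map]
    refine List.map_congr_left ?_
    intro m _
    simp only [Function.comp]
    rw [pow_succ]
    ring

theorem sumMask_cons (i : Nat) (t : List Nat) : sumMask (i :: t) = 2 ^ i + sumMask t := by
  simp [sumMask]

-- the main bridge: A's per-combination masks, in order, are exactly B's recursion
theorem combos_sum_eq_altF : ∀ (kk n : Nat),
    (combosA (List.range n) kk).map sumMask = altF n kk := by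
  intro kk
  induction kk with
  | zero => intro n; simp [combosA, altF, sumMask]
  | succ kk ihk =>
    intro n
    induction n with
    | zero => simp [combosA, altF]
    | succ n ihn =>
      rw [List.range_succ_eq_map]
      show (combosA (0 :: (List.range n).map Nat.succ) (kk + 1)).map sumMask = _
      rw [combosA]
      simp only [List.length_map, List.length_range]
      by_cases hg : n < kk
      · rw [if_pos hg, altF_eq_nil (kk + 1) (n + 1) (by omega)]
        simp
      rw [if_neg hg, altF_succ_succ, List.map_append]
      congr 1
      · rw [combosA_map, List.map_map, List.map_map, ← ihk n, List.map_map]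
        refine List.map_congr_left ?_
        intro s _
        show sumMask (0 :: s.map Nat.succ) = 2 * sumMask s + 1
        rw [sumMask_cons, sumMask_map_succ]
        ring
      · rw [combosA_map, List.map_map, ← ihn, List.map_map]
        refine List.map_congr_left ?_
        intro s _
        show sumMask (s.map Nat.succ) = 2 * sumMask s
        exact sumMask_map_succ s

theorem foldl_append_map {α β : Type} (f : α → β) :
    ∀ (l : List α) (acc : List β), l.foldl (fun out s => out ++ [f s]) acc = acc ++ l.map f := by
  intro l
  induction l with
  | nil => intro acc; simp
  | cons x xs ih => intro acc; simp [ih]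

-- ===== VERDICT (by name: the statement is the Claim_ definition above) =====
theorem basis_bitmasks_k_spec : Claim_equal_basis_bitmasks_k := by
  intro n k _ hpre
  unfold Pre_basis_bitmasks_k at hpre
  unfold Spec_basis_bitmasks_k basis_bitmasks_k basis_bitmasks_k_alt
  by_cases hk : k = 0
  · subst hk
    simp [altF]
  · rw [if_neg (by simpa using hk), if_neg (by omega)]
    rw [foldl_append_map, List.nil_append]
    have hr : PySem.List.pyRange 0 n 1 = (List.range n.toNat).map (fun j : Nat => (j : Int)) := by
      rw [PySem.List.pyRange_one]
      simp
    rw [hr, combosA_map, List.map_map, ← combos_sum_eq_altF k.toNat n.toNat]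
    refine List.map_congr_left ?_
    intro s hs
    simp only [Function.comp_apply]
    show (s.map (fun j : Nat => (j : Int))).foldl
        (fun acc i => PySem.Int.bor acc ((1 : Int) <<< i.toNat)) 0 = sumMask s
    rw [List.foldl_map]
    simp only [Int.toNat_natCast, shl_natCast]
    have hpw : s.Pairwise (· < ·) :=
      List.Pairwise.sublist (combosA_sublist (List.range n.toNat) k.toNat s hs)
        List.pairwise_lt_range
    have := foldA_eq_sumMask s 0 0 hpw (fun j _ => Nat.zero_le j) (by norm_num)
    simpa using this
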